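-- pv_equiv track=rewrite | github.com/michibiki-io/ocis-subpath | scripts/release/read_release.py | auto_targets
-- ===== SOURCE A (Python) =====
-- def section_changed(
--     current: dict[str, dict[str, str]],
--     previous: dict[str, dict[str, str]] | None,
--     section: str,
--     keys: set[str],
-- ) -> bool:
--     if previous is None:
--         return False
--     return any(current.get(section, {}).get(key, "") != previous.get(section, {}).get(key, "") for key in keys)
--
-- def matches_any(path: str, prefixes: tuple[str, ...], exact: tuple[str, ...] = ()) -> bool:
--     return path in exact or any(path.startswith(prefix) for prefix in prefixes)
--
-- def auto_targets(
--     current: dict[str, dict[str, str]],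
--     previous: dict[str, dict[str, str]] | None,
--     files: list[str],
--     missing_releases: dict[str, bool] | None = None,
--     chart_changed: bool = False,
-- ) -> dict[str, str]:
--     missing_releases = missing_releases or {}
--     ocis = any(matches_any(path, ("images/ocis-subpath/",), ()) for path in files)
--     ocis = ocis or section_changed(current, previous, "ocis", {"upstreamRef", "imageTag", "repo"})
--     ocis = ocis or missing_releases.get("ocis", False)
--
--     patcher = any(
--         matches_any(path, ("images/web-assets-patcher/",), ("scripts/build-patcher-image.sh",))
--         for path in files
--     )
--     patcher = patcher or section_changed(current, previous, "web", {"upstreamRef", "repo"})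
--     patcher = patcher or section_changed(current, previous, "patcher", {"imageTag"})
--     patcher = patcher or missing_releases.get("patcher", False)
--
--     chart = any(matches_any(path, ("charts/ocis-subpath/",), ()) for path in files)
--     chart = chart or section_changed(current, previous, "chart", {"version", "appVersion"})
--     chart = chart or chart_changed
--     chart = chart or missing_releases.get("chart", False)
--
--     return {
--         "release_ocis": "true" if ocis else "false",
--         "release_patcher": "true" if patcher else "false",
--         "release_chart": "true" if chart else "false",
--     }
-- ===== SOURCE B (Python) =====
-- _SPECS = (
--     ("ocis", ("images/ocis-subpath/",), (),
--      frozenset({("ocis", "upstreamRef"), ("ocis", "imageTag"), ("ocis", "repo")})),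
--     ("patcher", ("images/web-assets-patcher/",), ("scripts/build-patcher-image.sh",),
--      frozenset({("web", "upstreamRef"), ("web", "repo"), ("patcher", "imageTag")})),
--     ("chart", ("charts/ocis-subpath/",), (),
--      frozenset({("chart", "version"), ("chart", "appVersion")})),
-- )
--
--
-- def _config_diff(current, previous):
--     """Set of all (section, key) pairs whose value (default "") changed."""
--     if previous is None:
--         return set()
--     diff = set()
--     for sec in set(current) | set(previous):
--         cur = current.get(sec, {})
--         prev = previous.get(sec, {})
--         for key in set(cur) | set(prev):
--             if cur.get(key, "") != prev.get(key, ""):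
--                 diff.add((sec, key))
--     return diff
--
--
-- def auto_targets(current, previous, files, missing_releases=None, chart_changed=False):
--     diff = _config_diff(current, previous)
--     mr = missing_releases or {}
--     extra = {"chart": chart_changed}
--     out = {}
--     for name, prefixes, exact, watched in _SPECS:
--         hit = any(p in exact or p.startswith(prefixes) for p in files)
--         hit = hit or not diff.isdisjoint(watched)
--         hit = hit or extra.get(name, False) or mr.get(name, False)
--         out["release_" + name] = "true" if hit else "false"
--     return out
-- ===== Notes on version B (the rewrite author's own statement) =====
-- stated objective: alternative
-- what changed: Table-driven rewrite: precompute the full config diff once as a set of changed (section,key) pairs over the union of all sections/keys, then evaluate every release target uniformly from a declarative spec table (prefixes, exact paths, watched pairs) instead of three hand-written per-target blocks with per-key section_changed calls.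
import Mathlib
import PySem

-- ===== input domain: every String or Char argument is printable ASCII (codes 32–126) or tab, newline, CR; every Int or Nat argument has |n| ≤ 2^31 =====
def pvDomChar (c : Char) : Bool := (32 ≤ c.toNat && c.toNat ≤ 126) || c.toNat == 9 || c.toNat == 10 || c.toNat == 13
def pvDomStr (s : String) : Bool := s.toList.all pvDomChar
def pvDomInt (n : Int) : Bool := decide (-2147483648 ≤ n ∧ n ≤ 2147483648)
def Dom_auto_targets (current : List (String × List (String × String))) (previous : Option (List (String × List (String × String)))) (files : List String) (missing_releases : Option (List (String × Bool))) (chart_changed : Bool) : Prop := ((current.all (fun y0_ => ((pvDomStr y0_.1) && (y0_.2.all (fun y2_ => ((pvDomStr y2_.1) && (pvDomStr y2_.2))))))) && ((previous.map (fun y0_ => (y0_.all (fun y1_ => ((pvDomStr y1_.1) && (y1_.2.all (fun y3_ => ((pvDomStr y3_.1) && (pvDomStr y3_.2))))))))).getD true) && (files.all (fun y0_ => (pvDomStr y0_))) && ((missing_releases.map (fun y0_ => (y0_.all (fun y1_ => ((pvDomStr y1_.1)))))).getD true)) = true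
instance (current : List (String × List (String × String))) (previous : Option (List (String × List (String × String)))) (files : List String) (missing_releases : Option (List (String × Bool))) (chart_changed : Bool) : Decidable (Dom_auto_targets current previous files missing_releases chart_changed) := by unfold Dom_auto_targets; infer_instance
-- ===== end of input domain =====

-- B is a table-driven rewrite (a precomputed config-diff set plus a declarative spec table); objective: alternative decomposition, not faster.

-- ===== PORT A =====
def sc_get (d : List (String × String)) (k : String) : String := ((d.lookup k).getD "")

def section_changed (current : List (String × List (String × String))) (previous : Option (List (String × List (String × String)))) (sect : String) (keys : List String) : Bool :=
  match previous with
  | none => false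
  | some prev => keys.any (fun key =>
      sc_get ((current.lookup sect).getD []) key != sc_get ((prev.lookup sect).getD []) key)

def matches_any (path : String) (prefixes : List String) (exact : List String) : Bool :=
  exact.contains path || prefixes.any (fun pre => PySem.Str.startswith path pre)

def auto_targets (current : List (String × List (String × String))) (previous : Option (List (String × List (String × String)))) (files : List String) (missing_releases : Option (List (String × Bool))) (chart_changed : Bool) : List (String × String) :=
  let mr : List (String × Bool) := match missing_releases with | none => [] | some d => d
  let ocis := files.any (fun path => matches_any path ["images/ocis-subpath/"] [])
  let ocis := ocis || section_changed current previous "ocis" ["upstreamRef", "imageTag", "repo"]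
  let ocis := ocis || ((mr.lookup "ocis").getD false)
  let patcher := files.any (fun path => matches_any path ["images/web-assets-patcher/"] ["scripts/build-patcher-image.sh"])
  let patcher := patcher || section_changed current previous "web" ["upstreamRef", "repo"]
  let patcher := patcher || section_changed current previous "patcher" ["imageTag"]
  let patcher := patcher || ((mr.lookup "patcher").getD false)
  let chart := files.any (fun path => matches_any path ["charts/ocis-subpath/"] [])
  let chart := chart || section_changed current previous "chart" ["version", "appVersion"]
  let chart := chart || chart_changed
  let chart := chart || ((mr.lookup "chart").getD false)
  [("release_ocis", if ocis then "true" else "false"),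
   ("release_patcher", if patcher then "true" else "false"),
   ("release_chart", if chart then "true" else "false")]

-- ===== PORT B =====
-- the spec table: (target name, prefixes, exact paths, watched (section,key) pairs)
def alt_specs : List (String × List String × List String × List (String × String)) :=
  [("ocis", ["images/ocis-subpath/"], [],
    [("ocis", "upstreamRef"), ("ocis", "imageTag"), ("ocis", "repo")]),
   ("patcher", ["images/web-assets-patcher/"], ["scripts/build-patcher-image.sh"],
    [("web", "upstreamRef"), ("web", "repo"), ("patcher", "imageTag")]),
   ("chart", ["charts/ocis-subpath/"], [],
    [("chart", "version"), ("chart", "appVersion")])]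

-- _config_diff: the set of (section, key) pairs whose value (default "") changed
def config_diff (current : List (String × List (String × String))) (previous : Option (List (String × List (String × String)))) : PySem.Set (String × String) :=
  match previous with
  | none => PySem.Set.empty
  | some prev =>
    (PySem.Set.union (PySem.Set.ofList (current.map Prod.fst)) (prev.map Prod.fst)).foldl
      (fun diff sec =>
        let cur := (current.lookup sec).getD []
        let prv := (prev.lookup sec).getD []
        (PySem.Set.union (PySem.Set.ofList (cur.map Prod.fst)) (prv.map Prod.fst)).foldl
          (fun d key =>
            if ((cur.lookup key).getD "") ≠ ((prv.lookup key).getD "")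
            then PySem.Set.add d (sec, key) else d) diff)
      PySem.Set.empty

def auto_targets_alt (current : List (String × List (String × String))) (previous : Option (List (String × List (String × String)))) (files : List String) (missing_releases : Option (List (String × Bool))) (chart_changed : Bool) : List (String × String) :=
  let diff := config_diff current previous
  let mr : List (String × Bool) := missing_releases.getD []
  let extra : List (String × Bool) := [("chart", chart_changed)]
  alt_specs.map (fun s =>
    let hit := files.any (fun p => s.2.2.1.contains p || s.2.1.any (fun pre => PySem.Str.startswith p pre))
    let hit := hit || !(PySem.Set.isdisjoint diff s.2.2.2)
    let hit := hit || ((extra.lookup s.1).getD false) || ((mr.lookup s.1).getD false)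
    ("release_" ++ s.1, if hit then "true" else "false"))

-- ===== PRECONDITION & SPEC =====
def Spec_auto_targets (current : List (String × List (String × String))) (previous : Option (List (String × List (String × String)))) (files : List String) (missing_releases : Option (List (String × Bool))) (chart_changed : Bool) (out : List (String × String)) : Prop := out = auto_targets_alt current previous files missing_releases chart_changed
instance (current : List (String × List (String × String))) (previous : Option (List (String × List (String × String)))) (files : List String) (missing_releases : Option (List (String × Bool))) (chart_changed : Bool) (out : List (String × String)) : Decidable (Spec_auto_targets current previous files missing_releases chart_changed out) := by unfold Spec_auto_targets; infer_instance

-- ===== CLAIM (what is proved, stated in full; the proofs are below) =====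
def Claim_equal_auto_targets : Prop := ∀ (current : List (String × List (String × String))) (previous : Option (List (String × List (String × String)))) (files : List String) (missing_releases : Option (List (String × Bool))) (chart_changed : Bool), Dom_auto_targets current previous files missing_releases chart_changed → Spec_auto_targets current previous files missing_releases chart_changed (auto_targets current previous files missing_releases chart_changed)

-- ===== LEMMAS AND PROOFS =====

-- "the (section, key) entry differs between current and previous" (proof-side abbreviation)
def differs (current prev : List (String × List (String × String))) (sec key : String) : Prop :=
  ((((current.lookup sec).getD []).lookup key).getD "") ≠ ((((prev.lookup sec).getD []).lookup key).getD "")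

theorem mem_inner_fold (cur prv : List (String × String)) (sec : String)
    (keys : List String) (acc : List (String × String)) (p : String × String) :
    p ∈ keys.foldl (fun d key =>
        if ((cur.lookup key).getD "") ≠ ((prv.lookup key).getD "")
        then PySem.Set.add d (sec, key) else d) acc ↔
    p ∈ acc ∨ (∃ k ∈ keys, p = (sec, k) ∧ ((cur.lookup k).getD "") ≠ ((prv.lookup k).getD "")) := by
  induction keys generalizing acc with
  | nil => simp
  | cons k ks ih =>
    rw [List.foldl_cons, ih]
    by_cases h : ((cur.lookup k).getD "") ≠ ((prv.lookup k).getD "")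
    · simp only [if_pos h, PySem.Set.mem_add]
      constructor
      · rintro (⟨hp | rfl⟩ | ⟨k', hk', rfl, hne⟩)
        · exact Or.inl hp
        · exact Or.inr ⟨k, by simp, rfl, h⟩
        · exact Or.inr ⟨k', by simp [hk'], rfl, hne⟩
      · rintro (hp | ⟨k', hk', rfl, hne⟩)
        · exact Or.inl (Or.inl hp)
        · rcases List.mem_cons.mp hk' with h' | hk'
          · cases h'; exact Or.inl (Or.inr rfl)
          · exact Or.inr ⟨k', hk', rfl, hne⟩
    · simp only [if_neg h]
      constructor
      · rintro (hp | ⟨k', hk', rfl, hne⟩)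
        · exact Or.inl hp
        · exact Or.inr ⟨k', by simp [hk'], rfl, hne⟩
      · rintro (hp | ⟨k', hk', rfl, hne⟩)
        · exact Or.inl hp
        · rcases List.mem_cons.mp hk' with h' | hk'
          · cases h'; exact absurd hne h
          · exact Or.inr ⟨k', hk', rfl, hne⟩

theorem mem_outer_fold (current prev : List (String × List (String × String)))
    (secs : List String) (acc : List (String × String)) (p : String × String) :
    p ∈ secs.foldl (fun diff sec =>
        let cur := (current.lookup sec).getD []
        let prv := (prev.lookup sec).getD []
        (PySem.Set.union (PySem.Set.ofList (cur.map Prod.fst)) (prv.map Prod.fst)).foldl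
          (fun d key =>
            if ((cur.lookup key).getD "") ≠ ((prv.lookup key).getD "")
            then PySem.Set.add d (sec, key) else d) diff) acc ↔
    p ∈ acc ∨ (∃ s ∈ secs, ∃ k ∈ PySem.Set.union
          (PySem.Set.ofList (((current.lookup s).getD []).map Prod.fst))
          (((prev.lookup s).getD []).map Prod.fst),
        p = (s, k) ∧ differs current prev s k) := by
  induction secs generalizing acc with
  | nil => simp
  | cons s ss ih =>
    rw [List.foldl_cons, ih]
    simp only [mem_inner_fold]
    unfold differs
    constructor
    · rintro (⟨hp | ⟨k, hk, rfl, hne⟩⟩ | ⟨s', hs', k, hk, rfl, hne⟩)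
      · exact Or.inl hp
      · exact Or.inr ⟨s, by simp, k, hk, rfl, hne⟩
      · exact Or.inr ⟨s', by simp [hs'], k, hk, rfl, hne⟩
    · rintro (hp | ⟨s', hs', k, hk, rfl, hne⟩)
      · exact Or.inl (Or.inl hp)
      · rcases List.mem_cons.mp hs' with h' | hs'
        · cases h'; exact Or.inl (Or.inr ⟨k, hk, rfl, hne⟩)
        · exact Or.inr ⟨s', hs', k, hk, rfl, hne⟩

theorem lookup_mem_keys {α : Type} (l : List (String × α)) (k : String) (v : α)
    (h : l.lookup k = some v) : k ∈ l.map Prod.fst := by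
  induction l with
  | nil => simp at h
  | cons x xs ih =>
    rw [List.lookup_cons] at h
    by_cases hk : (k == x.1) = true
    · simp [show k = x.1 from by simpa using hk]
    · rw [Bool.not_eq_true] at hk
      simp only [hk] at h
      simp [ih h]

theorem mem_config_diff (current prev : List (String × List (String × String))) (p : String × String) :
    p ∈ config_diff current (some prev) ↔ differs current prev p.1 p.2 := by
  unfold config_diff
  rw [mem_outer_fold]
  simp only [PySem.Set.empty, List.not_mem_nil, false_or]
  constructor
  · rintro ⟨s, _, k, _, rfl, hne⟩; exact hne
  · intro hne
    rcases p with ⟨s, k⟩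
    dsimp only at hne ⊢
    refine ⟨s, ?_, k, ?_, rfl, hne⟩
    · rw [PySem.Set.mem_union, PySem.Set.mem_ofList]
      rcases hc : current.lookup s with _ | v
      · rcases hp : prev.lookup s with _ | w
        · exact absurd (by simp [hc, hp]) hne
        · exact Or.inr (lookup_mem_keys _ _ _ hp)
      · exact Or.inl (lookup_mem_keys _ _ _ hc)
    · rw [PySem.Set.mem_union, PySem.Set.mem_ofList]
      rcases hc : ((current.lookup s).getD []).lookup k with _ | v
      · rcases hp : ((prev.lookup s).getD []).lookup k with _ | w
        · exact absurd (by simp [hc, hp]) hne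
        · exact Or.inr (lookup_mem_keys _ _ _ hp)
      · exact Or.inl (lookup_mem_keys _ _ _ hc)

theorem notdisjoint_some (current prev : List (String × List (String × String)))
    (W : List (String × String)) :
    (!(PySem.Set.isdisjoint (config_diff current (some prev)) W)) =
    W.any (fun pr =>
      sc_get ((current.lookup pr.1).getD []) pr.2 != sc_get ((prev.lookup pr.1).getD []) pr.2) := by
  rw [Bool.eq_iff_iff]
  rw [Bool.not_eq_true', Bool.eq_false_iff, Ne, PySem.Set.isdisjoint_iff]
  push Not
  simp only [List.any_eq_true, mem_config_diff, bne_iff_ne, sc_get, differs]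
  constructor
  · rintro ⟨x, hx, hxW⟩; exact ⟨x, hxW, hx⟩
  · rintro ⟨x, hxW, hx⟩; exact ⟨x, hx, hxW⟩

theorem notdisjoint_none (current : List (String × List (String × String)))
    (W : List (String × String)) :
    (!(PySem.Set.isdisjoint (config_diff current none) W)) = false := by
  simp [config_diff, PySem.Set.isdisjoint_iff, PySem.Set.empty]

-- ===== VERDICT (by name: the statement is the Claim_ definition above) =====
theorem auto_targets_spec : Claim_equal_auto_targets := by
  intro current previous files missing_releases chart_changed _
  unfold Spec_auto_targets auto_targets auto_targets_alt alt_specs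
  cases previous with
  | none =>
    cases missing_releases <;>
      simp [notdisjoint_none, section_changed, matches_any, List.lookup]
  | some prev =>
    cases missing_releases <;>
      simp [notdisjoint_some, section_changed, matches_any, List.lookup, sc_get, Bool.or_assoc]
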